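-- pv_equiv track=rewrite | github.com/nirmalhk7/CP | crush.py | soln
-- ===== SOURCE A (Python) =====
-- def soln(A,N):
--     v=[]
--     for i in range(len(A)):
--         v.append((A[i][0],A[i][2]))
--         v.append((A[i][1],-A[i][2]))
--     v.sort()
--     sumx, mx=0, 0
--     for i in range(2*len(A)):
--         sumx+= v[i][1]
--         mx = max(mx,sumx)
--     return mx
-- ===== SOURCE B (Python) =====
-- def soln(A, N):
--     best = 0
--     for c in {x for s, e, _ in A for x in (s, e)}:
--         cov = sum(v * ((s <= c) - (e <= c)) for s, e, v in A)
--         best = max(best, cov)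
--     return best
-- ===== Notes on version B (the rewrite author's own statement) =====
-- stated objective: alternative
-- what changed: B abandons the sort-and-sweep entirely: for each candidate coordinate it directly computes the stabbing weight (sum of v*((s<=c)-(e<=c)) over all intervals) and takes the maximum, a point-query brute force with no event list, no sort and no running prefix sum.
import Mathlib
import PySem

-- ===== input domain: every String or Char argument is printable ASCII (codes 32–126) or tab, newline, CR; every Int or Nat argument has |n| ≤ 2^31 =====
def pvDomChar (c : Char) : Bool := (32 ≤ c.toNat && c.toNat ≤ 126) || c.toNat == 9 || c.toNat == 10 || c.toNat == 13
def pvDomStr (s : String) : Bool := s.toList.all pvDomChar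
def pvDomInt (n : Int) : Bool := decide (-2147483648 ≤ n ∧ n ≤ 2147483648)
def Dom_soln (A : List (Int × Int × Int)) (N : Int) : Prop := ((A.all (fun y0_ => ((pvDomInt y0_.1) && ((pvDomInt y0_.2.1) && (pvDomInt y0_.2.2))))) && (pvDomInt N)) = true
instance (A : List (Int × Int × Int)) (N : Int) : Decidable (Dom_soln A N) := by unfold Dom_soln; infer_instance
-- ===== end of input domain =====

-- B replaces the sort-and-sweep by a direct point-query brute force: for each candidate
-- coordinate it sums the net stabbing weight over all intervals and takes the maximum
-- (alternative algorithm, no sort and no running prefix sum).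

-- ===== PORT A =====
-- v=[]; for i in range(len(A)): v.append((A[i][0],A[i][2])); v.append((A[i][1],-A[i][2]));
-- v.sort()  (Python's tuple sort is lexicographic: sorted2 with keys fst, snd);
-- then sumx/mx sweep over v[i] for i in range(2*len(A)).
def soln (A : List (Int × Int × Int)) (N : Int) : Int :=
  let v : List (Int × Int) :=
    A.foldl (fun v t => v ++ [(t.1, t.2.2)] ++ [(t.2.1, -t.2.2)]) []
  let vs := PySem.List.sorted2 v (fun p => p.1) (fun p => p.2)
  let r := (PySem.List.pyRange 0 (2 * (A.length : Int)) 1).foldl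
    (fun (p : Int × Int) i =>
      let s := p.1 + (PySem.List.pyGetD vs i (0, 0)).2
      (s, max p.2 s)) (0, 0)
  r.2

-- ===== PORT B =====
-- best = 0; for c in {x for s,e,_ in A for x in (s,e)}: cov = sum(v*((s<=c)-(e<=c)) for
-- s,e,v in A); best = max(best, cov); return best.  The Python set is PySem.Set built
-- from the discovered coordinates (the result is a max over independent values, so the
-- CPython set iteration order is immaterial); bool arithmetic (s<=c)-(e<=c) becomes the
-- explicit 1/0 difference.
def soln_alt (A : List (Int × Int × Int)) (N : Int) : Int :=
  let cands : List Int := PySem.Set.ofList (A.flatMap (fun t => [t.1, t.2.1]))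
  cands.foldl (fun best c =>
    let cov := A.foldl (fun acc t =>
      acc + t.2.2 * ((if t.1 ≤ c then (1 : Int) else 0) - (if t.2.1 ≤ c then (1 : Int) else 0))) 0
    max best cov) 0

-- ===== PRECONDITION & SPEC =====
def Spec_soln (A : List (Int × Int × Int)) (N : Int) (out : Int) : Prop := out = soln_alt A N
instance (A : List (Int × Int × Int)) (N : Int) (out : Int) : Decidable (Spec_soln A N out) := by unfold Spec_soln; infer_instance

-- ===== CLAIM (what is proved, stated in full; the proofs are below) =====
def Claim_equal_soln : Prop := ∀ (A : List (Int × Int × Int)) (N : Int), Dom_soln A N → Spec_soln A N (soln A N)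

-- ===== LEMMAS AND PROOFS =====

-- The 2N events of A, in A's append order.
def pvEvents (A : List (Int × Int × Int)) : List (Int × Int) :=
  A.flatMap (fun t => [(t.1, t.2.2), (t.2.1, -t.2.2)])

-- One sweep step: new running sum and running max.
def pvStep (p : Int × Int) (δ : Int) : Int × Int := (p.1 + δ, max p.2 (p.1 + δ))

-- Net delta at coordinate c.
def pvNet (A : List (Int × Int × Int)) (c : Int) : Int :=
  (((pvEvents A).filter (fun p => p.1 == c)).map (fun p => p.2)).sum

-- The block of the sorted event list at coordinate c.
def pvBlock (A : List (Int × Int × Int)) (c : Int) : List (Int × Int) :=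
  (PySem.List.sorted (((pvEvents A).filter (fun p => p.1 == c)).map (fun p => p.2))
    (fun x => x)).map (fun δ => (c, δ))

-- The sorted distinct coordinates.
def pvKeys (A : List (Int × Int × Int)) : List Int :=
  PySem.List.sorted (PySem.Set.ofList ((pvEvents A).map (fun p => p.1))) (fun x => x)

-- The stabbing weight at coordinate c: total delta of all events at coordinates ≤ c.
def pvCov (A : List (Int × Int × Int)) (c : Int) : Int :=
  (((pvEvents A).filter (fun p => decide (p.1 ≤ c))).map (fun p => p.2)).sum

-- A list whose members all have first component c is the pairing of c with its seconds.
lemma pv_filter_eq_map (c : Int) (l : List (Int × Int)) :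
    (l.filter (fun p => p.1 == c)).map (fun p => (c, p.2)) = l.filter (fun p => p.1 == c) := by
  induction l with
  | nil => rfl
  | cons p tl ih =>
    obtain ⟨p1, p2⟩ := p
    by_cases h : p1 = c
    · simp [h, ih]
    · simp [h, ih]

-- The valley lemma: sweeping an ascending block from a state with sum ≤ max peaks
-- either before the block (already in the max) or at the end of the block.
lemma pv_foldl_step_sorted (ds : List Int) (p : Int × Int) (h : p.1 ≤ p.2)
    (hs : ds.Pairwise (· ≤ ·)) : ds.foldl pvStep p = pvStep p ds.sum := by
  induction ds generalizing p with
  | nil => simp [pvStep, max_eq_left h]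
  | cons d tl ih =>
    rw [List.pairwise_cons] at hs
    have h1 : (pvStep p d).1 ≤ (pvStep p d).2 := le_max_right _ _
    rw [List.foldl_cons, ih _ h1 hs.2]
    have hb : p.1 + d ≤ max p.2 (p.1 + (d + tl.sum)) := by
      by_cases hd : d ≤ 0
      · exact le_max_of_le_left (by omega)
      · have hd' : 0 < d := by omega
        have : 0 ≤ tl.sum := List.sum_nonneg (fun x hx => le_of_lt (lt_of_lt_of_le hd' (hs.1 x hx)))
        exact le_max_of_le_right (by omega)
    simp only [pvStep, List.sum_cons]
    refine Prod.ext (by ring) ?_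
    simp only
    rw [show p.1 + d + tl.sum = p.1 + (d + tl.sum) by ring, max_right_comm, max_eq_left hb]

lemma pv_flatMap_perm {α β : Type} (K : List α) (f g : α → List β)
    (h : ∀ c ∈ K, (f c).Perm (g c)) : (K.flatMap f).Perm (K.flatMap g) := by
  induction K with
  | nil => rfl
  | cons c tl ih =>
    simp only [List.flatMap_cons]
    exact (h c (by simp)).append (ih (fun c' hc' => h c' (by simp [hc'])))

-- Grouping: a list is a permutation of its per-key filters over any Nodup key cover.
lemma pv_events_perm_flatMap_filter :
    ∀ (K : List Int) (l : List (Int × Int)), K.Nodup → (∀ p ∈ l, p.1 ∈ K) →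
      l.Perm (K.flatMap (fun c => l.filter (fun p => p.1 == c))) := by
  intro K
  induction K with
  | nil =>
    intro l _ h
    have : l = [] := List.eq_nil_iff_forall_not_mem.mpr (fun p hp => by simpa using h p hp)
    simp [this]
  | cons c K ih =>
    intro l hnd hmem
    rw [List.nodup_cons] at hnd
    have hK : ∀ c' ∈ K, (l.filter (fun p => !(p.1 == c))).filter (fun p => p.1 == c')
        = l.filter (fun p => p.1 == c') := by
      intro c' hc'
      rw [List.filter_filter]
      apply List.filter_congr
      intro p _
      by_cases h : p.1 = c'
      · have hcc : c' ≠ c := fun e => hnd.1 (e ▸ hc')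
        simp [h, hcc]
      · simp [h]
    have hperm1 : l.Perm (l.filter (fun p => p.1 == c) ++ l.filter (fun p => !(p.1 == c))) :=
      (List.filter_append_perm _ l).symm
    have hmem2 : ∀ p ∈ l.filter (fun p => !(p.1 == c)), p.1 ∈ K := by
      intro p hp
      rw [List.mem_filter] at hp
      have := hmem p hp.1
      simp at hp
      simpa [hp.2] using this
    have h2 := ih (l.filter (fun p => !(p.1 == c))) hnd.2 hmem2
    refine hperm1.trans ?_
    simp only [List.flatMap_cons]
    refine List.Perm.append_left _ ?_
    refine h2.trans ?_
    have : K.flatMap (fun c' => (l.filter (fun p => !(p.1 == c))).filter (fun p => p.1 == c'))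
        = K.flatMap (fun c' => l.filter (fun p => p.1 == c')) :=
      List.flatMap_congr hK
    rw [this]

-- Python's tuple comparison on (coord, delta) pairs is the lexicographic order.
lemma pv_sorted2_eq_lex (xs : List (Int × Int)) :
    PySem.List.sorted2 xs (fun p => p.1) (fun p => p.2) =
      PySem.List.sorted xs (fun p => toLex p) := by
  have hcmp : (fun (a b : Int × Int) => decide (a.1 < b.1) || (!decide (b.1 < a.1) && decide (a.2 < b.2)))
      = fun a b => decide (toLex a < toLex b) := by
    funext a b
    rcases lt_trichotomy a.1 b.1 with h | h | h <;>
      simp [Prod.Lex.toLex_lt_toLex, h, not_lt_of_gt]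
  rw [PySem.List.sorted_eq_foldl_insertBy]
  simp only [PySem.List.sorted2, hcmp]
  rfl

lemma pv_block_perm_filter (A : List (Int × Int × Int)) (c : Int) :
    (pvBlock A c).Perm ((pvEvents A).filter (fun p => p.1 == c)) := by
  unfold pvBlock
  refine (List.Perm.map _ (PySem.List.sorted_perm _ _ _)).trans ?_
  rw [List.map_map]
  simp only [Function.comp_def]
  rw [pv_filter_eq_map c]

-- A's sorted event list is the concatenation of per-coordinate blocks over sorted keys.
lemma pv_sorted_events_eq (A : List (Int × Int × Int)) :
    PySem.List.sorted (pvEvents A) (fun p => toLex p) = (pvKeys A).flatMap (pvBlock A) := by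
  apply PySem.List.eq_of_perm_of_pairwise_le_of_injective (fun p : Int × Int => toLex p)
    toLex.injective
  · refine (PySem.List.sorted_perm _ _ _).trans ?_
    have hnd : (pvKeys A).Nodup :=
      ((PySem.List.sorted_perm _ _ _).nodup_iff).mpr (PySem.Set.nodup_ofList _)
    have hm : ∀ p ∈ pvEvents A, p.1 ∈ pvKeys A := by
      intro p hp
      rw [pvKeys, PySem.List.mem_sorted, PySem.Set.mem_ofList]
      exact List.mem_map_of_mem hp
    refine (pv_events_perm_flatMap_filter _ _ hnd hm).trans ?_
    exact (pv_flatMap_perm _ _ _ (fun c _ => (pv_block_perm_filter A c).symm))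
  · exact PySem.List.sorted_pairwise _ _
  · rw [List.flatMap, List.pairwise_flatten]
    constructor
    · intro bl hbl
      obtain ⟨c, _, rfl⟩ := List.mem_map.mp hbl
      unfold pvBlock
      refine List.Pairwise.map _ ?_ (PySem.List.sorted_pairwise _ _)
      intro a b hab
      exact Prod.Lex.toLex_le_toLex.mpr (Or.inr ⟨rfl, hab⟩)
    · refine List.Pairwise.map _ ?_ (PySem.List.sorted_ofList_pairwise_lt _)
      intro c1 c2 h12 x hx y hy
      obtain ⟨a, _, rfl⟩ := List.mem_map.mp hx
      obtain ⟨b, _, rfl⟩ := List.mem_map.mp hy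
      exact Prod.Lex.toLex_le_toLex.mpr (Or.inl h12)

lemma pv_length_events (A : List (Int × Int × Int)) : (pvEvents A).length = 2 * A.length := by
  induction A with
  | nil => rfl
  | cons t tl ih => simp [pvEvents, List.flatMap_cons] at ih ⊢; omega

lemma pv_build_eq (A : List (Int × Int × Int)) :
    A.foldl (fun v t => v ++ [(t.1, t.2.2)] ++ [(t.2.1, -t.2.2)]) [] = pvEvents A := by
  simp only [List.append_assoc]
  rw [PySem.List.foldl_append_eq_flatMap]
  simp [pvEvents]

-- Sweeping the concatenated blocks equals sweeping one net delta per key.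
lemma pv_scan_blocks (A : List (Int × Int × Int)) :
    ∀ (K : List Int) (p : Int × Int), p.1 ≤ p.2 →
      ((K.flatMap (pvBlock A)).foldl (fun p e => pvStep p e.2) p) =
        K.foldl (fun p c => pvStep p (pvNet A c)) p := by
  intro K
  induction K with
  | nil => intro p _; rfl
  | cons c K ih =>
    intro p hp
    rw [List.flatMap_cons, List.foldl_append]
    have hblock : (pvBlock A c).foldl (fun p e => pvStep p e.2) p = pvStep p (pvNet A c) := by
      unfold pvBlock
      rw [List.foldl_map]
      have hs : (PySem.List.sorted (((pvEvents A).filter (fun p => p.1 == c)).map (fun p => p.2))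
          (fun x => x)).Pairwise (· ≤ ·) := by
        simpa using PySem.List.sorted_pairwise
          (((pvEvents A).filter (fun p => p.1 == c)).map (fun p => p.2)) (fun x => x)
      have := pv_foldl_step_sorted _ p hp hs
      simp only at this ⊢
      rw [this, (PySem.List.sorted_perm _ _ _).sum_eq]
      rfl
    rw [hblock, List.foldl_cons]
    exact ih _ (le_max_right _ _)

-- A reduces to the per-key net sweep over the sorted distinct coordinates.
lemma pv_soln_eq_netfold (A : List (Int × Int × Int)) (N : Int) :
    soln A N = ((pvKeys A).foldl (fun p c => pvStep p (pvNet A c)) (0, 0)).2 := by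
  unfold soln
  simp only [pv_build_eq]
  have hlen : (2 * (A.length : Int)) =
      (((PySem.List.sorted2 (pvEvents A) (fun p => p.1) (fun p => p.2)).length : Nat) : Int) := by
    rw [(PySem.List.sorted2_perm (pvEvents A) (fun p => p.1) (fun p => p.2) false).length_eq,
      pv_length_events]
    push_cast; ring
  rw [hlen, PySem.List.foldl_pyRange_zero_pyGetD'
    (PySem.List.sorted2 (pvEvents A) (fun p => p.1) (fun p => p.2)) ((0 : Int), (0 : Int))
    (fun (p : Int × Int) (e : Int × Int) => (p.1 + e.2, max p.2 (p.1 + e.2))) (0, 0)]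
  rw [pv_sorted2_eq_lex, pv_sorted_events_eq]
  have hL := pv_scan_blocks A (pvKeys A) (0, 0) (le_refl 0)
  simp only [pvStep] at hL ⊢
  rw [hL]

-- The max-sweep over strictly ascending keys equals the max of the prefix sums.
lemma pv_fold_max (net : Int → Int) :
    ∀ (K : List Int), K.Pairwise (· < ·) → ∀ (a m : Int), m ≥ a →
      (K.foldl (fun p c => pvStep p (net c)) (a, m)).2 =
        K.foldl (fun mx c => max mx (a + ((K.filter (fun c' => decide (c' ≤ c))).map net).sum)) m := by
  intro K
  induction K with
  | nil => intro _ a m _; rfl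
  | cons c0 K ih =>
    intro hpw a m hma
    rw [List.pairwise_cons] at hpw
    have hself : ∀ c ∈ c0 :: K, (c0 :: K).filter (fun c' => decide (c' ≤ c))
        = if c = c0 then [c0] else c0 :: K.filter (fun c' => decide (c' ≤ c)) := by
      intro c hc
      rcases List.mem_cons.mp hc with rfl | hc
      · simp only [if_pos rfl, List.filter_cons]
        have : ∀ c' ∈ K, ¬ (c' ≤ c) := fun c' hc' => not_le_of_gt (hpw.1 c' hc')
        simp only [decide_eq_true_eq] at *
        rw [List.filter_eq_nil_iff.mpr (by intro c' hc'; simpa using this c' hc')]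
        simp
      · have hlt : c0 < c := hpw.1 c hc
        rw [if_neg (by omega), List.filter_cons, if_pos (by simp; omega)]
    rw [List.foldl_cons, List.foldl_cons]
    have hfirst : (c0 :: K).filter (fun c' => decide (c' ≤ c0)) = [c0] := by
      simpa using hself c0 (by simp)
    rw [hfirst]
    simp only [List.map_cons, List.map_nil, List.sum_cons, List.sum_nil, add_zero]
    rw [show pvStep (a, m) (net c0) = (a + net c0, max m (a + net c0)) from rfl]
    have hrest : K.foldl (fun mx c => max mx (a + (((c0 :: K).filter (fun c' => decide (c' ≤ c))).map net).sum)) (max m (a + net c0))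
        = K.foldl (fun mx c => max mx ((a + net c0) + ((K.filter (fun c' => decide (c' ≤ c))).map net).sum)) (max m (a + net c0)) := by
      apply PySem.List.foldl_congr_mem
      intro acc c hc
      rw [hself c (by simp [hc]), if_neg (by have := hpw.1 c hc; omega)]
      simp only [List.map_cons, List.sum_cons]
      ring_nf
    rw [hrest, ih hpw.2 (a + net c0) (max m (a + net c0)) (le_max_right _ _)]

-- The keys are strictly ascending.
lemma pv_keys_pairwise (A : List (Int × Int × Int)) : (pvKeys A).Pairwise (· < ·) :=
  PySem.List.sorted_ofList_pairwise_lt _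

-- The prefix sum over keys ≤ c is exactly the stabbing weight at c.
lemma pv_prefix_eq_cov (A : List (Int × Int × Int)) (c : Int) :
    (((pvKeys A).filter (fun c' => decide (c' ≤ c))).map (pvNet A)).sum = pvCov A c := by
  have hnd : ((pvKeys A).filter (fun c' => decide (c' ≤ c))).Nodup :=
    (((PySem.List.sorted_perm _ _ _).nodup_iff).mpr (PySem.Set.nodup_ofList _)).filter _
  have hmem : ∀ p ∈ (pvEvents A).filter (fun p => decide (p.1 ≤ c)),
      p.1 ∈ (pvKeys A).filter (fun c' => decide (c' ≤ c)) := by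
    intro p hp
    rw [List.mem_filter] at hp ⊢
    refine ⟨?_, hp.2⟩
    rw [pvKeys, PySem.List.mem_sorted, PySem.Set.mem_ofList]
    exact List.mem_map_of_mem hp.1
  have hperm := pv_events_perm_flatMap_filter ((pvKeys A).filter (fun c' => decide (c' ≤ c)))
    ((pvEvents A).filter (fun p => decide (p.1 ≤ c))) hnd hmem
  have hfix : ∀ c' ∈ (pvKeys A).filter (fun c' => decide (c' ≤ c)),
      ((pvEvents A).filter (fun p => decide (p.1 ≤ c))).filter (fun p => p.1 == c')
        = (pvEvents A).filter (fun p => p.1 == c') := by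
    intro c' hc'
    rw [List.mem_filter] at hc'
    rw [List.filter_filter]
    apply List.filter_congr
    intro p _
    by_cases h : p.1 = c'
    · have hcle : c' ≤ c := of_decide_eq_true hc'.2
      simp [h, hcle]
    · simp [h]
  unfold pvCov
  rw [(hperm.map (fun p => p.2)).sum_eq]
  rw [List.flatMap_congr hfix]
  induction ((pvKeys A).filter (fun c' => decide (c' ≤ c))) with
  | nil => rfl
  | cons k ks ihk => simp only [List.flatMap_cons, List.map_append, List.sum_append, ihk, pvNet,
      List.map_cons, List.sum_cons]

-- B's inner sum is the stabbing weight.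
lemma pv_inner_eq_cov (A : List (Int × Int × Int)) (c : Int) :
    A.foldl (fun acc t =>
      acc + t.2.2 * ((if t.1 ≤ c then (1 : Int) else 0) - (if t.2.1 ≤ c then (1 : Int) else 0))) 0
      = pvCov A c := by
  suffices h : ∀ (a : Int), A.foldl (fun acc t =>
      acc + t.2.2 * ((if t.1 ≤ c then (1 : Int) else 0) - (if t.2.1 ≤ c then (1 : Int) else 0))) a
      = a + pvCov A c by simpa using h 0
  induction A with
  | nil => intro a; simp [pvCov, pvEvents]
  | cons t tl ih =>
    intro a
    rw [List.foldl_cons, ih]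
    simp only [pvCov, pvEvents, List.flatMap_cons, List.filter_append, List.map_append,
      List.sum_append]
    by_cases h1 : t.1 ≤ c <;> by_cases h2 : t.2.1 ≤ c <;>
      simp [h1, h2, List.filter_cons] <;> ring

-- B's candidate list is a permutation of the sorted keys.
lemma pv_cands_perm (A : List (Int × Int × Int)) :
    (PySem.Set.ofList (A.flatMap (fun t => [t.1, t.2.1])) : List Int).Perm (pvKeys A) := by
  have hco : (pvEvents A).map (fun p => p.1) = A.flatMap (fun t => [t.1, t.2.1]) := by
    induction A with
    | nil => rfl
    | cons t tl ih => simp [pvEvents, List.flatMap_cons] at ih ⊢; exact ih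
  rw [pvKeys, hco]
  exact (PySem.List.sorted_perm _ _ _).symm

-- ===== VERDICT (by name: the statement is the Claim_ definition above) =====
theorem soln_spec : Claim_equal_soln := by
  intro A N _
  unfold Spec_soln soln_alt
  rw [pv_soln_eq_netfold]
  have hB : ∀ (K : List Int) (m : Int), K.foldl (fun best c =>
      max best (A.foldl (fun acc t =>
        acc + t.2.2 * ((if t.1 ≤ c then (1 : Int) else 0) - (if t.2.1 ≤ c then (1 : Int) else 0))) 0)) m
      = K.foldl (fun best c => max best (pvCov A c)) m := by
    intro K m
    apply PySem.List.foldl_congr_mem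
    intro acc c _
    rw [pv_inner_eq_cov]
  simp only [hB]
  have hperm := pv_cands_perm A
  have hpf : List.foldl (fun best c => max best (pvCov A c)) 0
      (PySem.Set.ofList (A.flatMap (fun t => [t.1, t.2.1])) : List Int)
      = List.foldl (fun best c => max best (pvCov A c)) 0 (pvKeys A) :=
    hperm.foldl_eq' (fun x _ y _ z => max_right_comm z (pvCov A x) (pvCov A y)) 0
  rw [hpf]
  rw [pv_fold_max (pvNet A) (pvKeys A) (pv_keys_pairwise A) 0 0 (le_refl 0)]
  apply PySem.List.foldl_congr_mem
  intro acc c _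
  rw [pv_prefix_eq_cov, zero_add]
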